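-- pv_equiv track=rewrite | github.com/lindadalin318-crypto/Project-Ark | SideProject/StS2mod/tools/normalize_sts2_ids.py | infer_character_id
-- ===== SOURCE A (Python) =====
-- from typing import Any
--
-- def infer_character_id(path_scores: dict[str, Any]) -> str:
--     keys = set(path_scores.keys())
--     if {"strength_build", "exhaust_build", "block_build", "burn_build"} & keys or any(key.startswith("ironclad_") for key in keys):
--         return "IRONCLAD"
--     if {"poison_build", "infinite_build", "shiv_build", "evade_build", "discard_build"} & keys or any(key.startswith("silent_") for key in keys):
--         return "SILENT"
--     if {"frost_build", "lightning_build", "mixed_build", "orb_build"} & keys or any(key.startswith("defect_") for key in keys):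
--         return "DEFECT"
--     if {"divinity_build", "retain_build", "miracle_build"} & keys or any(key.startswith("watcher_") for key in keys):
--         return "WATCHER"
--     return ""
-- ===== SOURCE B (Python) =====
-- EXACT = {
--     "strength_build": "IRONCLAD", "exhaust_build": "IRONCLAD",
--     "block_build": "IRONCLAD", "burn_build": "IRONCLAD",
--     "poison_build": "SILENT", "infinite_build": "SILENT", "shiv_build": "SILENT",
--     "evade_build": "SILENT", "discard_build": "SILENT",
--     "frost_build": "DEFECT", "lightning_build": "DEFECT",
--     "mixed_build": "DEFECT", "orb_build": "DEFECT",
--     "divinity_build": "WATCHER", "retain_build": "WATCHER", "miracle_build": "WATCHER",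
-- }
-- PREFIXES = [("ironclad_", "IRONCLAD"), ("silent_", "SILENT"),
--             ("defect_", "DEFECT"), ("watcher_", "WATCHER")]
--
-- def infer_character_id(path_scores):
--     matched = set()
--     for key in path_scores:
--         ch = EXACT.get(key)
--         if ch is not None:
--             matched.add(ch)
--         for prefix, c in PREFIXES:
--             if key.startswith(prefix):
--                 matched.add(c)
--     for c in ("IRONCLAD", "SILENT", "DEFECT", "WATCHER"):
--         if c in matched:
--             return c
--     return ""
-- ===== Notes on version B (the rewrite author's own statement) =====
-- stated objective: alternative
-- what changed: Replaces the four group-major scans over the key set (one set-intersection plus one prefix scan per character) by a single key-major pass that classifies each key via one lookup table and one prefix list into a matched set, then returns the first match in the fixed priority order.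
import Mathlib
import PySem

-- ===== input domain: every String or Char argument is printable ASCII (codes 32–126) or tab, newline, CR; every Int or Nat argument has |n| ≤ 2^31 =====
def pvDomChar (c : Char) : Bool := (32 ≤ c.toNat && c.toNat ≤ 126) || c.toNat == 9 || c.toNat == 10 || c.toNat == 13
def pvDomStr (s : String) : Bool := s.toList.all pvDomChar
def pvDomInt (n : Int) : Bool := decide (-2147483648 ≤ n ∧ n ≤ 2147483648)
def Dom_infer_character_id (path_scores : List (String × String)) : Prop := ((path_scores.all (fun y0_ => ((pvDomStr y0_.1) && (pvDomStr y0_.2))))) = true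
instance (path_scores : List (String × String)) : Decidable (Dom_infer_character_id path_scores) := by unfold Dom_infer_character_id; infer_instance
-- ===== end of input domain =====

-- B replaces A's four group-major scans over the key set by one key-major pass building a
-- matched set via an exact-name table and a prefix list, then returns in fixed priority order.

-- ===== PORT A =====
def pvIron : List String := ["strength_build", "exhaust_build", "block_build", "burn_build"]
def pvSilentL : List String := ["poison_build", "infinite_build", "shiv_build", "evade_build", "discard_build"]
def pvDefectL : List String := ["frost_build", "lightning_build", "mixed_build", "orb_build"]
def pvWatcherL : List String := ["divinity_build", "retain_build", "miracle_build"]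

def infer_character_id (path_scores : List (String × String)) : String :=
  let keys : PySem.Set String := PySem.Set.ofList (path_scores.map Prod.fst)
  if PySem.Set.inter (PySem.Set.ofList pvIron) keys ≠ [] ∨ keys.any (fun k => PySem.Str.startswith k "ironclad_") = true then "IRONCLAD"
  else if PySem.Set.inter (PySem.Set.ofList pvSilentL) keys ≠ [] ∨ keys.any (fun k => PySem.Str.startswith k "silent_") = true then "SILENT"
  else if PySem.Set.inter (PySem.Set.ofList pvDefectL) keys ≠ [] ∨ keys.any (fun k => PySem.Str.startswith k "defect_") = true then "DEFECT"
  else if PySem.Set.inter (PySem.Set.ofList pvWatcherL) keys ≠ [] ∨ keys.any (fun k => PySem.Str.startswith k "watcher_") = true then "WATCHER"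
  else ""

-- ===== PORT B =====
def pvEXACT : PySem.Dict String String :=
  PySem.Dict.ofList [("strength_build", "IRONCLAD"), ("exhaust_build", "IRONCLAD"),
   ("block_build", "IRONCLAD"), ("burn_build", "IRONCLAD"),
   ("poison_build", "SILENT"), ("infinite_build", "SILENT"), ("shiv_build", "SILENT"),
   ("evade_build", "SILENT"), ("discard_build", "SILENT"),
   ("frost_build", "DEFECT"), ("lightning_build", "DEFECT"),
   ("mixed_build", "DEFECT"), ("orb_build", "DEFECT"),
   ("divinity_build", "WATCHER"), ("retain_build", "WATCHER"), ("miracle_build", "WATCHER")]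

def pvPREFIXES : List (String × String) :=
  [("ironclad_", "IRONCLAD"), ("silent_", "SILENT"), ("defect_", "DEFECT"), ("watcher_", "WATCHER")]

-- one iteration of B's key loop: exact-table lookup, then the prefix checks
def pvStep (m : PySem.Set String) (key : String) : PySem.Set String :=
  let m := match PySem.Dict.get? pvEXACT key with
    | some ch => PySem.Set.add m ch
    | none => m
  pvPREFIXES.foldl (fun m pc => if PySem.Str.startswith key pc.1 then PySem.Set.add m pc.2 else m) m

def infer_character_id_alt (path_scores : List (String × String)) : String :=
  let matched : PySem.Set String := path_scores.foldl (fun m kv => pvStep m kv.1) PySem.Set.empty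
  ((["IRONCLAD", "SILENT", "DEFECT", "WATCHER"].find? (fun c => PySem.Set.contains matched c)).getD "")

-- ===== PRECONDITION & SPEC =====
def Spec_infer_character_id (path_scores : List (String × String)) (out : String) : Prop := out = infer_character_id_alt path_scores
instance (path_scores : List (String × String)) (out : String) : Decidable (Spec_infer_character_id path_scores out) := by unfold Spec_infer_character_id; infer_instance

-- ===== CLAIM (what is proved, stated in full; the proofs are below) =====
def Claim_equal_infer_character_id : Prop := ∀ (path_scores : List (String × String)), Dom_infer_character_id path_scores → Spec_infer_character_id path_scores (infer_character_id path_scores)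

-- ===== LEMMAS AND PROOFS =====

-- a key "triggers" character c if B's step would add c to the matched set for it
def pvTrig (c k : String) : Prop :=
  PySem.Dict.get? pvEXACT k = some c ∨ ∃ pc ∈ pvPREFIXES, PySem.Str.startswith k pc.1 = true ∧ pc.2 = c

-- the items of the literal dict pvEXACT
theorem pvEXACT_items : pvEXACT.items =
  [("strength_build", "IRONCLAD"), ("exhaust_build", "IRONCLAD"),
   ("block_build", "IRONCLAD"), ("burn_build", "IRONCLAD"),
   ("poison_build", "SILENT"), ("infinite_build", "SILENT"), ("shiv_build", "SILENT"),
   ("evade_build", "SILENT"), ("discard_build", "SILENT"),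
   ("frost_build", "DEFECT"), ("lightning_build", "DEFECT"),
   ("mixed_build", "DEFECT"), ("orb_build", "DEFECT"),
   ("divinity_build", "WATCHER"), ("retain_build", "WATCHER"), ("miracle_build", "WATCHER")] := by
  decide

theorem mem_prefix_fold (ps : List (String × String)) (k : String) (m : PySem.Set String) (c : String) :
    c ∈ ps.foldl (fun m pc => if PySem.Str.startswith k pc.1 then PySem.Set.add m pc.2 else m) m
      ↔ c ∈ m ∨ ∃ pc ∈ ps, PySem.Str.startswith k pc.1 = true ∧ pc.2 = c := by
  induction ps generalizing m with
  | nil => simp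
  | cons hd tl ih =>
    simp only [List.foldl_cons, List.mem_cons]
    by_cases h : PySem.Str.startswith k hd.1 = true
    · rw [if_pos h, ih]
      simp only [PySem.Set.mem_add]
      constructor
      · rintro (( hm | rfl) | ⟨pc, hpc, h1, h2⟩)
        · exact Or.inl hm
        · exact Or.inr ⟨hd, Or.inl rfl, h, rfl⟩
        · exact Or.inr ⟨pc, Or.inr hpc, h1, h2⟩
      · rintro (hm | ⟨pc, (rfl | hpc), h1, h2⟩)
        · exact Or.inl (Or.inl hm)
        · exact Or.inl (Or.inr h2.symm)
        · exact Or.inr ⟨pc, hpc, h1, h2⟩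
    · rw [if_neg h, ih]
      constructor
      · rintro (hm | ⟨pc, hpc, h1, h2⟩)
        · exact Or.inl hm
        · exact Or.inr ⟨pc, Or.inr hpc, h1, h2⟩
      · rintro (hm | ⟨pc, (rfl | hpc), h1, h2⟩)
        · exact Or.inl hm
        · exact absurd h1 h
        · exact Or.inr ⟨pc, hpc, h1, h2⟩

theorem mem_pvStep (m : PySem.Set String) (k c : String) :
    c ∈ pvStep m k ↔ c ∈ m ∨ pvTrig c k := by
  unfold pvStep pvTrig
  cases h : PySem.Dict.get? pvEXACT k with
  | none =>
    rw [mem_prefix_fold]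
    constructor
    · rintro (hm | he)
      · exact Or.inl hm
      · exact Or.inr (Or.inr he)
    · rintro (hm | (he | he))
      · exact Or.inl hm
      · simp at he
      · exact Or.inr he
  | some ch =>
    rw [mem_prefix_fold]
    simp only [PySem.Set.mem_add]
    constructor
    · rintro ((hm | rfl) | he)
      · exact Or.inl hm
      · exact Or.inr (Or.inl rfl)
      · exact Or.inr (Or.inr he)
    · rintro (hm | (he | he))
      · exact Or.inl (Or.inl hm)
      · exact Or.inl (Or.inr (Option.some_inj.mp he).symm)
      · exact Or.inr he

theorem mem_fold (L : List (String × String)) (m : PySem.Set String) (c : String) :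
    c ∈ L.foldl (fun m kv => pvStep m kv.1) m ↔ c ∈ m ∨ ∃ kv ∈ L, pvTrig c kv.1 := by
  induction L generalizing m with
  | nil => simp
  | cons hd tl ih => simp [ih, mem_pvStep]; tauto

-- A's branch condition for a character, phrased over the raw key list
def pvHit (ex : List String) (p : String) (L : List (String × String)) : Prop :=
  ∃ kv ∈ L, kv.1 ∈ ex ∨ PySem.Str.startswith kv.1 p = true

theorem condA (ex : List String) (p : String) (L : List (String × String)) :
    (PySem.Set.inter (PySem.Set.ofList ex) (PySem.Set.ofList (L.map Prod.fst)) ≠ [] ∨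
      (PySem.Set.ofList (L.map Prod.fst)).any (fun k => PySem.Str.startswith k p) = true)
    ↔ pvHit ex p L := by
  unfold pvHit
  constructor
  · rintro (h | h)
    · rw [Ne, PySem.Set.inter, List.filter_eq_nil_iff] at h
      push_neg at h
      obtain ⟨x, hx, hc⟩ := h
      rw [PySem.Set.contains, List.contains_iff_mem, PySem.Set.mem_ofList] at hc
      obtain ⟨kv, hkv, rfl⟩ := List.mem_map.mp hc
      exact ⟨kv, hkv, Or.inl ((PySem.Set.mem_ofList ex _).mp hx)⟩
    · obtain ⟨x, hx, hp⟩ := List.any_eq_true.mp h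
      rw [PySem.Set.mem_ofList] at hx
      obtain ⟨kv, hkv, rfl⟩ := List.mem_map.mp hx
      exact ⟨kv, hkv, Or.inr hp⟩
  · rintro ⟨kv, hkv, h | h⟩
    · left
      rw [Ne, PySem.Set.inter, List.filter_eq_nil_iff]
      push_neg
      refine ⟨kv.1, (PySem.Set.mem_ofList ex _).mpr h, ?_⟩
      rw [PySem.Set.contains, List.contains_iff_mem, PySem.Set.mem_ofList]
      exact List.mem_map_of_mem hkv
    · right
      exact List.any_eq_true.mpr ⟨kv.1, (PySem.Set.mem_ofList _ _).mpr (List.mem_map_of_mem hkv), h⟩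

-- per character: B's trigger coincides with A's membership-or-prefix test
theorem trig_iron (k : String) : pvTrig "IRONCLAD" k ↔ (k ∈ pvIron ∨ PySem.Str.startswith k "ironclad_" = true) := by
  unfold pvTrig pvPREFIXES pvIron
  rw [PySem.Dict.get?_eq_some_iff_mem_items pvEXACT k "IRONCLAD" (by decide), pvEXACT_items]
  simp

theorem trig_silent (k : String) : pvTrig "SILENT" k ↔ (k ∈ pvSilentL ∨ PySem.Str.startswith k "silent_" = true) := by
  unfold pvTrig pvPREFIXES pvSilentL
  rw [PySem.Dict.get?_eq_some_iff_mem_items pvEXACT k "SILENT" (by decide), pvEXACT_items]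
  simp

theorem trig_defect (k : String) : pvTrig "DEFECT" k ↔ (k ∈ pvDefectL ∨ PySem.Str.startswith k "defect_" = true) := by
  unfold pvTrig pvPREFIXES pvDefectL
  rw [PySem.Dict.get?_eq_some_iff_mem_items pvEXACT k "DEFECT" (by decide), pvEXACT_items]
  simp

theorem trig_watcher (k : String) : pvTrig "WATCHER" k ↔ (k ∈ pvWatcherL ∨ PySem.Str.startswith k "watcher_" = true) := by
  unfold pvTrig pvPREFIXES pvWatcherL
  rw [PySem.Dict.get?_eq_some_iff_mem_items pvEXACT k "WATCHER" (by decide), pvEXACT_items]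
  simp

-- B's matched set contains character c iff A's branch condition for c holds
theorem mem_matched (L : List (String × String)) (c : String)
    (ex : List String) (p : String)
    (ht : ∀ k, pvTrig c k ↔ (k ∈ ex ∨ PySem.Str.startswith k p = true)) :
    c ∈ L.foldl (fun m kv => pvStep m kv.1) PySem.Set.empty ↔ pvHit ex p L := by
  rw [mem_fold]
  unfold pvHit
  constructor
  · rintro (hm | ⟨kv, hkv, htr⟩)
    · exact absurd hm (List.not_mem_nil)
    · exact ⟨kv, hkv, (ht kv.1).mp htr⟩
  · rintro ⟨kv, hkv, hc⟩
    exact Or.inr ⟨kv, hkv, (ht kv.1).mpr hc⟩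

-- ===== VERDICT (by name: the statement is the Claim_ definition above) =====
theorem infer_character_id_spec : Claim_equal_infer_character_id := by
  intro L _
  unfold Spec_infer_character_id infer_character_id infer_character_id_alt
  by_cases hI : pvHit pvIron "ironclad_" L
  · have e1 : "IRONCLAD" ∈ L.foldl (fun m kv => pvStep m kv.1) ([] : PySem.Set String) := (mem_matched L "IRONCLAD" pvIron "ironclad_" trig_iron).mpr hI
    rw [if_pos ((condA _ _ _).mpr hI)]
    simp [List.find?, e1]
  · have e1 : "IRONCLAD" ∉ L.foldl (fun m kv => pvStep m kv.1) ([] : PySem.Set String) :=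
      fun hc => hI ((mem_matched L "IRONCLAD" pvIron "ironclad_" trig_iron).mp hc)
    rw [if_neg (fun h => hI ((condA _ _ _).mp h))]
    by_cases hS : pvHit pvSilentL "silent_" L
    · have e2 : "SILENT" ∈ L.foldl (fun m kv => pvStep m kv.1) ([] : PySem.Set String) := (mem_matched L "SILENT" pvSilentL "silent_" trig_silent).mpr hS
      rw [if_pos ((condA _ _ _).mpr hS)]
      simp [List.find?, e1, e2]
    · have e2 : "SILENT" ∉ L.foldl (fun m kv => pvStep m kv.1) ([] : PySem.Set String) :=
        fun hc => hS ((mem_matched L "SILENT" pvSilentL "silent_" trig_silent).mp hc)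
      rw [if_neg (fun h => hS ((condA _ _ _).mp h))]
      by_cases hD : pvHit pvDefectL "defect_" L
      · have e3 : "DEFECT" ∈ L.foldl (fun m kv => pvStep m kv.1) ([] : PySem.Set String) := (mem_matched L "DEFECT" pvDefectL "defect_" trig_defect).mpr hD
        rw [if_pos ((condA _ _ _).mpr hD)]
        simp [List.find?, e1, e2, e3]
      · have e3 : "DEFECT" ∉ L.foldl (fun m kv => pvStep m kv.1) ([] : PySem.Set String) :=
          fun hc => hD ((mem_matched L "DEFECT" pvDefectL "defect_" trig_defect).mp hc)
        rw [if_neg (fun h => hD ((condA _ _ _).mp h))]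
        by_cases hW : pvHit pvWatcherL "watcher_" L
        · have e4 : "WATCHER" ∈ L.foldl (fun m kv => pvStep m kv.1) ([] : PySem.Set String) := (mem_matched L "WATCHER" pvWatcherL "watcher_" trig_watcher).mpr hW
          rw [if_pos ((condA _ _ _).mpr hW)]
          simp [List.find?, e1, e2, e3, e4]
        · have e4 : "WATCHER" ∉ L.foldl (fun m kv => pvStep m kv.1) ([] : PySem.Set String) :=
            fun hc => hW ((mem_matched L "WATCHER" pvWatcherL "watcher_" trig_watcher).mp hc)
          rw [if_neg (fun h => hW ((condA _ _ _).mp h))]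
          simp [List.find?, e1, e2, e3, e4]
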